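-- pv_equiv track=rewrite | github.com/adminregtura/regtura | src/regtura/validate/excel_parser.py | _match_template
-- ===== SOURCE A (Python) =====
-- SHEET_TO_TEMPLATE = {
--     "F 01.01": "F 01.01", "F01.01": "F 01.01", "F0101": "F 01.01",
--     "Balance Sheet": "F 01.01",
-- }
--
-- def _match_template(sheet_name: str) -> str | None:
--     clean = sheet_name.strip()
--     if clean in SHEET_TO_TEMPLATE:
--         return SHEET_TO_TEMPLATE[clean]
--     normalised = clean.replace(" ", "").replace(".", "").upper()
--     for key, tid in SHEET_TO_TEMPLATE.items():
--         if key.replace(" ", "").replace(".", "").upper() == normalised: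
--             return tid
--     return None
-- ===== SOURCE B (Python) =====
-- SHEET_TO_TEMPLATE = {
--     "F 01.01": "F 01.01", "F01.01": "F 01.01", "F0101": "F 01.01",
--     "Balance Sheet": "F 01.01",
-- }
--
-- def _normalise(name):
--     return name.replace(" ", "").replace(".", "").upper()
--
-- _NORMALISED_LOOKUP = {_normalise(k): tid for k, tid in SHEET_TO_TEMPLATE.items()}
--
-- def _match_template(sheet_name: str) -> str | None:
--     return _NORMALISED_LOOKUP.get(_normalise(sheet_name.strip()))
-- ===== Notes on version B (the rewrite author's own statement) =====
-- stated objective: simpler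
-- what changed: B precomputes a module-level dict from normalized sheet names to template ids once, so _match_template is a single strip-normalise-lookup with no exact-match branch and no per-call scan over SHEET_TO_TEMPLATE.
import Mathlib
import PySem

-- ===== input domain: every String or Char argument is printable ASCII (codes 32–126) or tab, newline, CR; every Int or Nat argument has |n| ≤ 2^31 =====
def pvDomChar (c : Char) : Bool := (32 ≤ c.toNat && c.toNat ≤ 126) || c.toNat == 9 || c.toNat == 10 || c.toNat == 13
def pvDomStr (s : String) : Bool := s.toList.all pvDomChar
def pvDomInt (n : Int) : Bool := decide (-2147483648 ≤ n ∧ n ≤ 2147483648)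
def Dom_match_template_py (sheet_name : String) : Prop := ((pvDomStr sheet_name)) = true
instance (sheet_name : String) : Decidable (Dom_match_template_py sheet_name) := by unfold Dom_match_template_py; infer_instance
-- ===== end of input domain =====

-- B replaces A's exact-match branch plus per-call normalizing scan with one precomputed
-- normalized-key lookup table; simpler, same result on every input.

-- ===== PORT A =====
def SHEET_TO_TEMPLATE : PySem.Dict String String :=
  PySem.Dict.ofList [("F 01.01", "F 01.01"), ("F01.01", "F 01.01"), ("F0101", "F 01.01"),
                     ("Balance Sheet", "F 01.01")]

-- the inline expression key.replace(" ", "").replace(".", "").upper() from A's code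
def pvNormExprA (s : String) : String :=
  PySem.Str.upper (PySem.Str.replace (PySem.Str.replace s " " "") "." "")

-- the 'for key, tid in SHEET_TO_TEMPLATE.items(): if … return tid' loop
def pvMatchLoopA (normalised : String) : List (String × String) → Option String
  | [] => none
  | (key, tid) :: rest =>
      if pvNormExprA key == normalised then some tid else pvMatchLoopA normalised rest

def match_template_py (sheet_name : String) : Option String :=
  let clean := PySem.Str.strip sheet_name
  if SHEET_TO_TEMPLATE.contains clean then SHEET_TO_TEMPLATE.get? clean
  else
    let normalised := pvNormExprA clean
    pvMatchLoopA normalised SHEET_TO_TEMPLATE.items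

-- ===== PORT B =====
def pvNormaliseB (name : String) : String :=
  PySem.Str.upper (PySem.Str.replace (PySem.Str.replace name " " "") "." "")

-- module-level: {_normalise(k): tid for k, tid in SHEET_TO_TEMPLATE.items()}
def NORMALISED_LOOKUP : PySem.Dict String String :=
  PySem.Dict.ofList (SHEET_TO_TEMPLATE.items.map (fun p => (pvNormaliseB p.1, p.2)))

def match_template_py_alt (sheet_name : String) : Option String :=
  NORMALISED_LOOKUP.get? (pvNormaliseB (PySem.Str.strip sheet_name))

-- ===== PRECONDITION & SPEC =====
def Spec_match_template_py (sheet_name : String) (out : Option String) : Prop := out = match_template_py_alt sheet_name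
instance (sheet_name : String) (out : Option String) : Decidable (Spec_match_template_py sheet_name out) := by unfold Spec_match_template_py; infer_instance

-- ===== CLAIM (what is proved, stated in full; the proofs are below) =====
def Claim_equal_match_template_py : Prop := ∀ (sheet_name : String), Dom_match_template_py sheet_name → Spec_match_template_py sheet_name (match_template_py sheet_name)

-- ===== LEMMAS AND PROOFS =====

-- both sides are functions of the stripped name only
set_option maxHeartbeats 1000000 in
theorem pv_body_eq (clean : String) :
    (if SHEET_TO_TEMPLATE.contains clean then SHEET_TO_TEMPLATE.get? clean
     else pvMatchLoopA (pvNormExprA clean) SHEET_TO_TEMPLATE.items)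
      = NORMALISED_LOOKUP.get? (pvNormaliseB clean) := by
  -- normalized forms of the four keys, each evaluated once
  have e1 : pvNormExprA "F 01.01" = "F0101" := by decide
  have e2 : pvNormExprA "F01.01" = "F0101" := by decide
  have e3 : pvNormExprA "F0101" = "F0101" := by decide
  have e4 : pvNormExprA "Balance Sheet" = "BALANCESHEET" := by decide
  -- B's normalizer is definitionally the same function
  have b1 : pvNormaliseB "F 01.01" = "F0101" := e1
  have b2 : pvNormaliseB "F01.01" = "F0101" := e2
  have b3 : pvNormaliseB "F0101" = "F0101" := e3
  have b4 : pvNormaliseB "Balance Sheet" = "BALANCESHEET" := e4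
  have hbn : pvNormaliseB clean = pvNormExprA clean := rfl
  have hI : SHEET_TO_TEMPLATE.items = [("F 01.01", "F 01.01"), ("F01.01", "F 01.01"),
      ("F0101", "F 01.01"), ("Balance Sheet", "F 01.01")] := by decide
  have hN : NORMALISED_LOOKUP = PySem.Dict.mk [("F0101", "F 01.01"), ("BALANCESHEET", "F 01.01")] := by
    unfold NORMALISED_LOOKUP
    rw [hI]
    simp only [List.map]
    rw [b1, b2, b3, b4]
    decide
  by_cases h : SHEET_TO_TEMPLATE.contains clean = true
  · -- exact-match branch: clean is one of the four literal keys
    have hD : SHEET_TO_TEMPLATE = PySem.Dict.mk [("F 01.01", "F 01.01"), ("F01.01", "F 01.01"),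
        ("F0101", "F 01.01"), ("Balance Sheet", "F 01.01")] := by decide
    have hk : clean = "F 01.01" ∨ clean = "F01.01" ∨ clean = "F0101" ∨ clean = "Balance Sheet" := by
      rw [hD] at h
      simpa [PySem.Dict.contains_eq_decide_mem_keys, PySem.Dict.keys_mk, or_assoc] using h
    rcases hk with h' | h' | h' | h' <;> subst h' <;> rw [if_pos h, hN, hD]
    · rw [b1]; decide
    · rw [b2]; decide
    · rw [b3]; decide
    · rw [b4]; decide
  · rw [if_neg h]
    -- loop branch: both sides compare the normalized name against "F0101" and "BALANCESHEET"
    rw [hbn, hI, hN]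
    generalize pvNormExprA clean = n
    simp only [pvMatchLoopA, e1, e2, e3, e4, PySem.Dict.get?_mk_cons]
    by_cases h1 : "F0101" = n
    · simp [h1]
    · by_cases h2 : "BALANCESHEET" = n
      · simp [h1, h2]
      · simp [h1, h2, PySem.Dict.get?]

-- ===== VERDICT (by name: the statement is the Claim_ definition above) =====
theorem match_template_py_spec : Claim_equal_match_template_py := by
  intro sheet_name _
  unfold Spec_match_template_py match_template_py match_template_py_alt
  exact pv_body_eq (PySem.Str.strip sheet_name)
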